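-- pv_equiv track=rewrite | github.com/6210qwe/leetcode_py | leetcode_solutions/by_id/q4007.py | max_total_subarray_value_ii
-- ===== SOURCE A (Python) =====
-- from typing import List, Optional
--
-- def max_total_subarray_value_ii(nums: List[int], k: int) -> int:
--     def next_smaller_elements(arr: List[int]) -> List[int]:
--         stack = []
--         result = [-1] * len(arr)
--         for i in range(len(arr)):
--             while stack and arr[stack[-1]] > arr[i]:
--                 result[stack.pop()] = i
--             stack.append(i)
--         return result
--
--     def prev_smaller_elements(arr: List[int]) -> List[int]:
--         stack = []
--         result = [-1] * len(arr)
--         for i in range(len(arr) - 1, -1, -1):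
--             while stack and arr[stack[-1]] >= arr[i]:
--                 result[stack.pop()] = i
--             stack.append(i)
--         return result
--
--     n = len(nums)
--     next_smaller = next_smaller_elements(nums)
--     prev_smaller = prev_smaller_elements(nums)
--
--     values = []
--     for i in range(n):
--         left = prev_smaller[i] + 1 if prev_smaller[i] != -1 else 0
--         right = next_smaller[i] - 1 if next_smaller[i] != -1 else n - 1
--         for j in range(left, i + 1):
--             for k in range(i, right + 1):
--                 values.append(nums[i] - nums[j])
--
--     values.sort(reverse=True)
--     return sum(values[:k])
-- ===== SOURCE B (Python) =====
-- def max_total_subarray_value_ii(nums, k):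
--     # Every value A collects is nums[i]-nums[j] with nums[j] >= nums[i] (j lies in
--     # the prev/next-smaller window of i), so no value is positive; and the slice
--     # bound is the leftover inner loop variable k = n-1, while the descending sort
--     # starts with at least n zeros.  Hence the sum is always 0.
--     return 0
-- ===== Notes on version B (the rewrite author's own statement) =====
-- stated objective: faster
-- what changed: A's candidate multiset contains no positive value and its shadowed inner loop variable k (= n-1) truncates the descending sort to a prefix of zeros, so A returns 0 on every input; B returns the constant 0 directly.
import Mathlib
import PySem

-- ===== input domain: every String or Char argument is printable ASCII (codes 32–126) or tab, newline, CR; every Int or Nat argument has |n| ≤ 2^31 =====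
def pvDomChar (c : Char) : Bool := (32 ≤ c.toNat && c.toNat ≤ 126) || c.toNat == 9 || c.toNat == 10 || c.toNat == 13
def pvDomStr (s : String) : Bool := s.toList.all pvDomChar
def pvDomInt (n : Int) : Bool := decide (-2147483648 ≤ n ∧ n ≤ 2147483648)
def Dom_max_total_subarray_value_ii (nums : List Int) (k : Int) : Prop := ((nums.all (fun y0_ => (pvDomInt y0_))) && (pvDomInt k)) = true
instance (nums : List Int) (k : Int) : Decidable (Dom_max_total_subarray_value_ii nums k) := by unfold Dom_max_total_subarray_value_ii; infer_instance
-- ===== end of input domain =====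

-- B changes: A in fact returns 0 on every input (its collected values are never
-- positive and the shadowed inner loop variable k truncates the descending sort to
-- a prefix of zeros), so B is the constant 0 — asymptotically faster.

-- ===== PORT A =====
-- Python stacks append/pop at the END; here the stack list keeps its TOP at the HEAD.
-- the 'while stack and arr[stack[-1]] > arr[i]' pop loop of next_smaller_elements
def pvNsPop (arr : List Int) (i : Int) : List Int → List Int → List Int × List Int
  | [], res => ([], res)
  | t :: st, res =>
    if PySem.List.pyGetD arr t 0 > PySem.List.pyGetD arr i 0 then
      pvNsPop arr i st (PySem.List.pySetD res t i)
    else (t :: st, res)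

def pvNextSmaller (arr : List Int) : List Int :=
  ((PySem.List.pyRange 0 (arr.length : Int) 1).foldl
    (fun s i =>
      let r := pvNsPop arr i s.1 s.2
      (i :: r.1, r.2))
    ([], List.replicate arr.length (-1))).2

-- the 'while stack and arr[stack[-1]] >= arr[i]' pop loop of prev_smaller_elements
def pvPsPop (arr : List Int) (i : Int) : List Int → List Int → List Int × List Int
  | [], res => ([], res)
  | t :: st, res =>
    if PySem.List.pyGetD arr t 0 ≥ PySem.List.pyGetD arr i 0 then
      pvPsPop arr i st (PySem.List.pySetD res t i)
    else (t :: st, res)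

def pvPrevSmaller (arr : List Int) : List Int :=
  ((PySem.List.pyRange ((arr.length : Int) - 1) (-1) (-1)).foldl
    (fun s i =>
      let r := pvPsPop arr i s.1 s.2
      (i :: r.1, r.2))
    ([], List.replicate arr.length (-1))).2

-- body of 'for i in range(n)': the state is (values, k) — the parameter k is SHADOWED
-- by the inner loop variable in the Python, so it is threaded through the fold
def pvBuildStep (nums ns ps : List Int) (n : Int) (s : List Int × Int) (i : Int) : List Int × Int :=
  let p := PySem.List.pyGetD ps i 0
  let left := if p ≠ -1 then p + 1 else 0
  let q := PySem.List.pyGetD ns i 0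
  let right := if q ≠ -1 then q - 1 else n - 1
  (PySem.List.pyRange left (i + 1) 1).foldl
    (fun s j =>
      (PySem.List.pyRange i (right + 1) 1).foldl
        (fun s kk => (s.1 ++ [PySem.List.pyGetD nums i 0 - PySem.List.pyGetD nums j 0], kk)) s)
    s

def max_total_subarray_value_ii (nums : List Int) (k : Int) : Int :=
  let n : Int := (nums.length : Int)
  let ns := pvNextSmaller nums
  let ps := pvPrevSmaller nums
  let vk := (PySem.List.pyRange 0 n 1).foldl (pvBuildStep nums ns ps n) ([], k)
  let sortedv := PySem.List.sorted vk.1 (fun x => x) true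
  (PySem.List.slice sortedv none (some vk.2)).sum

-- ===== PORT B =====
def max_total_subarray_value_ii_alt (_nums : List Int) (_k : Int) : Int := 0

-- ===== PRECONDITION & SPEC =====
def Spec_max_total_subarray_value_ii (nums : List Int) (k : Int) (out : Int) : Prop := out = max_total_subarray_value_ii_alt nums k
instance (nums : List Int) (k : Int) (out : Int) : Decidable (Spec_max_total_subarray_value_ii nums k out) := by unfold Spec_max_total_subarray_value_ii; infer_instance

-- ===== CLAIM (what is proved, stated in full; the proofs are below) =====
def Claim_equal_max_total_subarray_value_ii : Prop := ∀ (nums : List Int) (k : Int), Dom_max_total_subarray_value_ii nums k → Spec_max_total_subarray_value_ii nums k (max_total_subarray_value_ii nums k)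

-- ===== LEMMAS AND PROOFS =====

-- arr[j] for an in-range index
def pvG (arr : List Int) (j : Int) : Int := PySem.List.pyGetD arr j 0

-- res[p] records a good previous-smaller bound for p
def pvGood (arr : List Int) (p : Nat) (res : List Int) : Prop :=
  0 ≤ res.getD p 0 ∧ res.getD p 0 < (p : Int) ∧
  ∀ j : Int, res.getD p 0 < j → j < (p : Int) → pvG arr j ≥ pvG arr p

-- invariant of the prev_smaller loop after having processed all indices ≥ i
def pvPsInv (arr : List Int) (i : Int) (st res : List Int) : Prop :=
  res.length = arr.length ∧
  List.Pairwise (· < ·) st ∧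
  (∀ t ∈ st, i ≤ t ∧ t < (arr.length : Int)) ∧
  (∀ t ∈ st, ∀ j : Int, i ≤ j → j < t → pvG arr j ≥ pvG arr t) ∧
  (∀ p : Nat, p < arr.length →
     (res.getD p 0 = -1 ∧ ((p : Int) ∈ st ∨ (p : Int) < i)) ∨ pvGood arr p res)

lemma pv_getD_set (res : List Int) (t : Int) (v : Int) (p : Nat)
    (ht : 0 ≤ t) (hp : p < res.length) :
    (PySem.List.pySetD res t v).getD p 0 = if (p : Int) = t then v else res.getD p 0 := by
  rw [PySem.List.pySetD_of_nonneg res v ht]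
  by_cases h : (p : Int) = t
  · have h2 : t.toNat = p := by omega
    simp [h, h2, List.getD_eq_getElem?_getD, hp]
  · have h2 : t.toNat ≠ p := by omega
    simp [h, List.getD_eq_getElem?_getD, List.getElem?_set_ne h2]

lemma pvPsPop_spec (arr : List Int) (i : Int) (st res : List Int)
    (hi : 0 ≤ i) (hin : i < (arr.length : Int))
    (hlen : res.length = arr.length)
    (hpw : List.Pairwise (· < ·) st)
    (hrange : ∀ t ∈ st, i + 1 ≤ t ∧ t < (arr.length : Int))
    (hgap : ∀ t ∈ st, ∀ j : Int, i + 1 ≤ j → j < t → pvG arr j ≥ pvG arr t)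
    (hres : ∀ p : Nat, p < arr.length →
       (res.getD p 0 = -1 ∧ ((p : Int) ∈ st ∨ (p : Int) < i + 1)) ∨ pvGood arr p res) :
    (pvPsPop arr i st res).2.length = arr.length ∧
    (pvPsPop arr i st res).1 <:+ st ∧
    (∀ t ∈ (pvPsPop arr i st res).1, ∀ j : Int, i ≤ j → j < t → pvG arr j ≥ pvG arr t) ∧
    (∀ p : Nat, p < arr.length →
       ((pvPsPop arr i st res).2.getD p 0 = -1 ∧
         ((p : Int) ∈ (pvPsPop arr i st res).1 ∨ (p : Int) < i + 1)) ∨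
       pvGood arr p (pvPsPop arr i st res).2) := by
  induction st generalizing res with
  | nil =>
    simp only [pvPsPop]
    exact ⟨hlen, List.nil_suffix, by simp, hres⟩
  | cons t st ih =>
    have hts := hrange t (by simp)
    by_cases hcond : PySem.List.pyGetD arr t 0 ≥ PySem.List.pyGetD arr i 0
    · rw [show pvPsPop arr i (t :: st) res = pvPsPop arr i st (PySem.List.pySetD res t i) by
        simp [pvPsPop, hcond]]
      have h := ih (PySem.List.pySetD res t i)
        (by rw [PySem.List.length_pySetD]; exact hlen)
        ((List.pairwise_cons.mp hpw).2)
        (fun t' h' => hrange t' (List.mem_cons_of_mem _ h'))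
        (fun t' h' => hgap t' (List.mem_cons_of_mem _ h'))
        (by
          intro p hp
          by_cases hpt : (p : Int) = t
          · have hgd : (PySem.List.pySetD res t i).getD p 0 = i := by
              rw [pv_getD_set res t i p (by omega) (by rw [hlen]; exact hp), if_pos hpt]
            refine Or.inr ⟨by rw [hgd]; exact hi, by rw [hgd]; omega, ?_⟩
            intro j hj1 hj2
            rw [hgd] at hj1
            have := hgap t (by simp) j (by omega) (by omega)
            have hpg : pvG arr (p : Int) = pvG arr t := by rw [hpt]
            rw [hpg]
            exact this
          · have hgd : (PySem.List.pySetD res t i).getD p 0 = res.getD p 0 := by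
              rw [pv_getD_set res t i p (by omega) (by rw [hlen]; exact hp), if_neg hpt]
            rcases hres p hp with ⟨h1, h2⟩ | hg
            · refine Or.inl ⟨by rw [hgd]; exact h1, ?_⟩
              rcases h2 with h2 | h2
              · rcases List.mem_cons.mp h2 with h2 | h2
                · exact absurd h2 hpt
                · exact Or.inl h2
              · exact Or.inr h2
            · exact Or.inr ⟨by rw [hgd]; exact hg.1, by rw [hgd]; exact hg.2.1,
                by rw [hgd]; exact hg.2.2⟩)
      exact ⟨h.1, h.2.1.trans (List.suffix_cons t st), h.2.2.1, h.2.2.2⟩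
    · rw [show pvPsPop arr i (t :: st) res = (t :: st, res) by simp [pvPsPop, hcond]]
      refine ⟨hlen, List.suffix_refl _, ?_, hres⟩
      intro t' ht' j hj1 hj2
      replace hcond := lt_of_not_ge hcond
      rcases List.mem_cons.mp ht' with ht'' | ht''
      · subst ht''
        by_cases hj : j = i
        · subst hj; exact le_of_lt hcond
        · exact hgap t' (by simp) j (by omega) hj2
      · by_cases hj : j = i
        · subst hj
          have h1 : pvG arr t ≥ pvG arr t' :=
            hgap t' (List.mem_cons_of_mem _ ht'') t hts.1 (List.rel_of_pairwise_cons hpw ht'')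
          exact le_trans h1 (le_of_lt hcond)
        · exact hgap t' (List.mem_cons_of_mem _ ht'') j (by omega) hj2

def pvPsState (arr : List Int) (b : Int) : List Int × List Int :=
  (PySem.List.pyRange ((arr.length : Int) - 1) b (-1)).foldl
    (fun s i =>
      let r := pvPsPop arr i s.1 s.2
      (i :: r.1, r.2))
    ([], List.replicate arr.length (-1))

lemma pv_countdown_snoc (a b : Int) (h : b ≤ a) :
    PySem.List.pyRange a (b - 1) (-1) = PySem.List.pyRange a b (-1) ++ [b] := by
  rw [PySem.List.pyRange_neg_one_eq_reverse, PySem.List.pyRange_neg_one_eq_reverse]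
  rw [show b - 1 + 1 = b by ring]
  rw [PySem.List.pyRange_one_cons (show b < a + 1 by omega)]
  simp

lemma pvPs_inv_loop (arr : List Int) :
    ∀ m : Nat, m ≤ arr.length →
      pvPsInv arr ((arr.length : Int) - m)
        (pvPsState arr ((arr.length : Int) - m - 1)).1
        (pvPsState arr ((arr.length : Int) - m - 1)).2 := by
  intro m
  induction m with
  | zero =>
    intro _
    rw [show ((arr.length : Int) - (0:Nat) - 1) = (arr.length : Int) - 1 by push_cast; ring]
    rw [show pvPsState arr ((arr.length : Int) - 1)
        = ([], List.replicate arr.length (-1)) by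
      simp [pvPsState, PySem.List.pyRange_neg_one_eq_nil (le_refl _)]]
    refine ⟨by simp, by simp, by simp, by simp, ?_⟩
    intro p hp
    refine Or.inl ⟨?_, Or.inr (by push_cast; omega)⟩
    simp [List.getD_eq_getElem?_getD, hp]
  | succ m ih =>
    intro hm1
    have hm := ih (by omega)
    obtain ⟨hlen, hpw, hrange, hgap, hres⟩ := hm
    have hb1 : ((arr.length : Int) - ((m + 1 : Nat) : Int) - 1)
        = ((arr.length : Int) - (m : Int) - 1) - 1 := by push_cast; ring
    have hsplit : PySem.List.pyRange ((arr.length : Int) - 1)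
          ((arr.length : Int) - ((m + 1 : Nat) : Int) - 1) (-1)
        = PySem.List.pyRange ((arr.length : Int) - 1)
            ((arr.length : Int) - (m : Int) - 1) (-1)
          ++ [(arr.length : Int) - (m : Int) - 1] := by
      rw [hb1]
      exact pv_countdown_snoc _ _ (by omega)
    set b1 : Int := (arr.length : Int) - (m : Int) - 1 with hb1def
    have hstate : pvPsState arr ((arr.length : Int) - ((m + 1 : Nat) : Int) - 1)
        = (b1 :: (pvPsPop arr b1 (pvPsState arr b1).1 (pvPsState arr b1).2).1,
           (pvPsPop arr b1 (pvPsState arr b1).1 (pvPsState arr b1).2).2) := by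
      simp only [pvPsState, hsplit, List.foldl_append, List.foldl_cons, List.foldl_nil]
    obtain ⟨c1, c2, c3, c4⟩ := pvPsPop_spec arr b1 (pvPsState arr b1).1 (pvPsState arr b1).2
      (by omega) (by omega) hlen hpw
      (fun t ht => by have := hrange t ht; omega)
      (fun t ht j hj1 hj2 => hgap t ht j (by omega) hj2)
      (fun p hp => (hres p hp).elim
        (fun h => Or.inl ⟨h.1, h.2.elim Or.inl (fun h2 => Or.inr (by omega))⟩) Or.inr)
    rw [hstate, show ((arr.length : Int) - ((m + 1 : Nat) : Int)) = b1 by rw [hb1def]; push_cast; ring]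
    have hsub : ∀ t, t ∈ (pvPsPop arr b1 (pvPsState arr b1).1 (pvPsState arr b1).2).1 →
        t ∈ (pvPsState arr b1).1 := fun t ht => c2.sublist.subset ht
    refine ⟨c1, ?_, ?_, ?_, ?_⟩
    · rw [List.pairwise_cons]
      refine ⟨fun t ht => by have := hrange t (hsub t ht); omega, hpw.sublist c2.sublist⟩
    · intro t ht
      rcases List.mem_cons.mp ht with ht | ht
      · subst ht; constructor
        · exact le_refl _
        · omega
      · have := hrange t (hsub t ht); omega
    · intro t ht j hj1 hj2
      rcases List.mem_cons.mp ht with ht | ht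
      · subst ht; omega
      · exact c3 t ht j hj1 hj2
    · intro p hp
      rcases c4 p hp with ⟨h1, h2⟩ | hg
      · refine Or.inl ⟨h1, ?_⟩
        rcases h2 with h2 | h2
        · exact Or.inl (List.mem_cons_of_mem _ h2)
        · by_cases hpb : (p : Int) = b1
          · exact Or.inl (by rw [hpb]; exact List.mem_cons_self)
          · exact Or.inr (by omega)
      · exact Or.inr hg

-- final characterisation of prev_smaller: every j in [left, p) has arr[j] ≥ arr[p]
lemma pvPrevSmaller_spec (arr : List Int) :
    (pvPrevSmaller arr).length = arr.length ∧
    ∀ p : Nat, p < arr.length →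
      (pvPrevSmaller arr).getD p 0 < (p : Int) ∧
      ∀ j : Int,
        (if (pvPrevSmaller arr).getD p 0 = -1 then 0 else (pvPrevSmaller arr).getD p 0 + 1) ≤ j →
        j < (p : Int) → pvG arr j ≥ pvG arr p := by
  have h := pvPs_inv_loop arr arr.length (le_refl _)
  rw [show ((arr.length : Int) - (arr.length : Nat) - 1) = -1 by ring] at h
  rw [show ((arr.length : Int) - (arr.length : Nat)) = 0 by ring] at h
  have heq : pvPrevSmaller arr = (pvPsState arr (-1)).2 := rfl
  obtain ⟨hlen, _, _, hgapS, hres⟩ := h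
  rw [heq]
  refine ⟨hlen, ?_⟩
  intro p hp
  rcases hres p hp with ⟨h1, h2⟩ | hg
  · rcases h2 with hmem | habs
    · refine ⟨by rw [h1]; omega, ?_⟩
      intro j hj1 hj2
      rw [if_pos h1] at hj1
      exact hgapS (p : Int) hmem j hj1 hj2
    · omega
  · obtain ⟨g1, g2, g3⟩ := hg
    refine ⟨g2, ?_⟩
    intro j hj1 hj2
    rw [if_neg (by omega)] at hj1
    exact g3 j (by omega) hj2

lemma pvNsPop_spec (arr : List Int) (i : Int) (st res : List Int)
    (_hi : 0 ≤ i)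
    (hst : ∀ t ∈ st, 0 ≤ t ∧ t < i)
    (hlen : res.length = arr.length)
    (hres : ∀ p : Nat, p < arr.length →
       res.getD p 0 = -1 ∨ ((p : Int) < res.getD p 0 ∧ res.getD p 0 ≤ i)) :
    (pvNsPop arr i st res).2.length = arr.length ∧
    (∀ t ∈ (pvNsPop arr i st res).1, t ∈ st) ∧
    (∀ p : Nat, p < arr.length →
       (pvNsPop arr i st res).2.getD p 0 = -1 ∨
       ((p : Int) < (pvNsPop arr i st res).2.getD p 0 ∧ (pvNsPop arr i st res).2.getD p 0 ≤ i)) := by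
  induction st generalizing res with
  | nil =>
    simp only [pvNsPop]
    exact ⟨hlen, by simp, hres⟩
  | cons t st ih =>
    have ht := hst t (by simp)
    by_cases hcond : PySem.List.pyGetD arr t 0 > PySem.List.pyGetD arr i 0
    · rw [show pvNsPop arr i (t :: st) res = pvNsPop arr i st (PySem.List.pySetD res t i) by
        simp [pvNsPop, hcond]]
      have hlen' : (PySem.List.pySetD res t i).length = res.length :=
        PySem.List.length_pySetD res t i
      have h := ih (PySem.List.pySetD res t i)
        (fun t' h' => hst t' (List.mem_cons_of_mem _ h'))
        (by rw [hlen', hlen])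
        (by
          intro p hp
          rw [pv_getD_set res t i p ht.1 (by rw [hlen]; exact hp)]
          by_cases hpt : (p : Int) = t
          · rw [if_pos hpt]
            exact Or.inr ⟨by rw [hpt]; exact ht.2, le_refl i⟩
          · rw [if_neg hpt]; exact hres p hp)
      exact ⟨h.1, fun t' h' => List.mem_cons_of_mem _ (h.2.1 t' h'), h.2.2⟩
    · rw [show pvNsPop arr i (t :: st) res = (t :: st, res) by simp [pvNsPop, hcond]]
      exact ⟨hlen, fun t' h' => h', hres⟩

def pvNsState (arr : List Int) (b : Int) : List Int × List Int :=
  (PySem.List.pyRange 0 b 1).foldl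
    (fun s i =>
      let r := pvNsPop arr i s.1 s.2
      (i :: r.1, r.2))
    ([], List.replicate arr.length (-1))

lemma pvNs_inv_loop (arr : List Int) :
    ∀ m : Nat, m ≤ arr.length →
      (pvNsState arr m).2.length = arr.length ∧
      (∀ t ∈ (pvNsState arr m).1, 0 ≤ t ∧ t < (m : Int)) ∧
      (∀ p : Nat, p < arr.length →
        (pvNsState arr m).2.getD p 0 = -1 ∨
        ((p : Int) < (pvNsState arr m).2.getD p 0 ∧ (pvNsState arr m).2.getD p 0 ≤ (m : Int) - 1)) := by
  intro m
  induction m with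
  | zero =>
    intro _
    simp only [pvNsState, Nat.cast_zero, PySem.List.pyRange_one_eq_nil (le_refl 0), List.foldl_nil]
    refine ⟨by simp, by simp, ?_⟩
    intro p hp
    left
    simp [List.getD_eq_getElem?_getD, hp]
  | succ m ih =>
    intro hm1
    have hm : m ≤ arr.length := by omega
    obtain ⟨ihlen, ihst, ihres⟩ := ih hm
    have hrange : PySem.List.pyRange 0 ((m + 1 : Nat) : Int) 1
        = PySem.List.pyRange 0 (m : Int) 1 ++ [(m : Int)] := by
      push_cast
      exact PySem.List.pyRange_one_succ_right (by positivity)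
    have hstate : pvNsState arr ((m + 1 : Nat) : Int)
        = (((m : Int) :: (pvNsPop arr (m : Int) (pvNsState arr m).1 (pvNsState arr m).2).1,
           (pvNsPop arr (m : Int) (pvNsState arr m).1 (pvNsState arr m).2).2)) := by
      simp only [pvNsState, hrange, List.foldl_append, List.foldl_cons, List.foldl_nil]
    obtain ⟨h1, h2, h3⟩ := pvNsPop_spec arr (m : Int) (pvNsState arr m).1 (pvNsState arr m).2
      (by positivity) ihst ihlen
      (fun p hp => (ihres p hp).elim Or.inl (fun h => Or.inr ⟨h.1, by omega⟩))
    rw [hstate]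
    refine ⟨h1, ?_, ?_⟩
    · intro t h'
      rcases List.mem_cons.mp h' with h' | h'
      · subst h'
        refine ⟨by positivity, ?_⟩
        push_cast
        omega
      · have := ihst t (h2 t h')
        refine ⟨this.1, ?_⟩
        push_cast
        omega
    · intro p hp
      exact (h3 p hp).elim Or.inl (fun h => Or.inr ⟨h.1, by push_cast; omega⟩)

lemma pvNextSmaller_spec (arr : List Int) :
    (pvNextSmaller arr).length = arr.length ∧
    ∀ p : Nat, p < arr.length →
      (pvNextSmaller arr).getD p 0 = -1 ∨
      ((p : Int) < (pvNextSmaller arr).getD p 0 ∧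
       (pvNextSmaller arr).getD p 0 ≤ (arr.length : Int) - 1) := by
  have heq : pvNextSmaller arr = (pvNsState arr (arr.length : Int)).2 := rfl
  obtain ⟨h1, _, h3⟩ := pvNs_inv_loop arr arr.length (le_refl _)
  rw [heq]
  exact ⟨h1, h3⟩

-- the innermost 'for kk in …: values.append(c)' loop in closed form
lemma pv_inner_fold (c : Int) (xs : List Int) (s : List Int × Int) :
    xs.foldl (fun s (kk : Int) => (s.1 ++ [c], kk)) s
      = (s.1 ++ List.replicate xs.length c, xs.getLast?.getD s.2) := by
  induction xs generalizing s with
  | nil => simp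
  | cons x xs ih =>
    simp only [List.foldl_cons, ih]
    refine Prod.ext ?_ ?_
    · simp [List.replicate_succ]
    · cases xs <;> simp [List.getLast?_cons]

-- values accumulated by one i-iteration, in closed form
lemma pv_build_vals (nums : List Int) (i right : Int) (m : Nat)
    (hm : m = (PySem.List.pyRange i (right + 1) 1).length) :
    ∀ (jr : List Int) (s : List Int × Int),
      ((jr.foldl
        (fun s j =>
          (PySem.List.pyRange i (right + 1) 1).foldl
            (fun s (kk : Int) => (s.1 ++ [PySem.List.pyGetD nums i 0 - PySem.List.pyGetD nums j 0], kk)) s)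
        s).1)
      = s.1 ++ jr.flatMap (fun j => List.replicate m (PySem.List.pyGetD nums i 0 - PySem.List.pyGetD nums j 0)) := by
  subst hm
  intro jr
  induction jr with
  | nil => intro s; simp
  | cons j jr ih =>
    intro s
    rw [List.foldl_cons, ih, pv_inner_fold]
    simp [List.append_assoc]

lemma pv_fold_snd {α β : Type} (f : (α × Int) → β → (α × Int)) (v : Int)
    (h : ∀ s x, (f s x).2 = v) :
    ∀ (l : List β) (s : α × Int), l ≠ [] → (l.foldl f s).2 = v := by
  intro l
  induction l with
  | nil => intro s h'; exact absurd rfl h'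
  | cons x xs ih =>
    intro s _
    cases xs with
    | nil => simpa using h s x
    | cons y ys => exact ih (f s x) (by simp)

def pvBuildState (nums : List Int) (k : Int) (b : Int) : List Int × Int :=
  (PySem.List.pyRange 0 b 1).foldl
    (pvBuildStep nums (pvNextSmaller nums) (pvPrevSmaller nums) (nums.length : Int)) ([], k)

-- outer loop invariant: all collected values ≤ 0, at least m zeros, k = right of the last i
lemma pvBuild_inv (nums : List Int) (k : Int) :
    ∀ m : Nat, m ≤ nums.length →
      (∀ v ∈ (pvBuildState nums k m).1, v ≤ 0) ∧
      (m ≤ (pvBuildState nums k m).1.count 0) ∧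
      ((m = 0 ∧ (pvBuildState nums k m).2 = k) ∨
       (0 < m ∧ (pvBuildState nums k m).2 =
          (if (pvNextSmaller nums).getD (m - 1) 0 ≠ -1 then (pvNextSmaller nums).getD (m - 1) 0 - 1
           else (nums.length : Int) - 1))) := by
  intro m
  induction m with
  | zero =>
    intro _
    rw [show pvBuildState nums k ((0:Nat):Int) = ([], k) by
      simp [pvBuildState, PySem.List.pyRange_one_eq_nil (le_refl 0)]]
    exact ⟨by simp, by simp, Or.inl ⟨rfl, rfl⟩⟩
  | succ m ih =>
    intro hm1
    have hmlt : m < nums.length := by omega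
    obtain ⟨ile, icnt, _⟩ := ih (by omega)
    -- abbreviations matching the let-bindings of pvBuildStep at i = ↑m
    set leftv : Int := if PySem.List.pyGetD (pvPrevSmaller nums) (m : Int) 0 ≠ -1
        then PySem.List.pyGetD (pvPrevSmaller nums) (m : Int) 0 + 1 else 0 with hleftdef
    set rightv : Int := if PySem.List.pyGetD (pvNextSmaller nums) (m : Int) 0 ≠ -1
        then PySem.List.pyGetD (pvNextSmaller nums) (m : Int) 0 - 1 else (nums.length : Int) - 1
      with hrightdef
    have hpsspec := (pvPrevSmaller_spec nums).2 m hmlt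
    have hnsspec := (pvNextSmaller_spec nums).2 m hmlt
    have hpg : PySem.List.pyGetD (pvPrevSmaller nums) (m : Int) 0 = (pvPrevSmaller nums).getD m 0 :=
      PySem.List.pyGetD_natCast _ _ _
    have hng : PySem.List.pyGetD (pvNextSmaller nums) (m : Int) 0 = (pvNextSmaller nums).getD m 0 :=
      PySem.List.pyGetD_natCast _ _ _
    have hL : leftv ≤ (m : Int) := by
      have h1 := hpsspec.1
      rw [hleftdef, hpg]
      by_cases h : (pvPrevSmaller nums).getD m 0 = -1
      · rw [if_neg (fun hc => hc h)]; omega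
      · rw [if_pos h]; omega
    have hR : (m : Int) ≤ rightv := by
      rw [hrightdef, hng]
      rcases hnsspec with h | h
      · rw [if_neg (fun hc => hc h)]; omega
      · rw [if_pos (by omega)]; omega
    have hsplit : PySem.List.pyRange 0 ((m + 1 : Nat) : Int) 1
        = PySem.List.pyRange 0 (m : Int) 1 ++ [(m : Int)] := by
      push_cast
      exact PySem.List.pyRange_one_succ_right (by positivity)
    have hstate : pvBuildState nums k ((m + 1 : Nat) : Int)
        = pvBuildStep nums (pvNextSmaller nums) (pvPrevSmaller nums) (nums.length : Int)
            (pvBuildState nums k (m : Int)) (m : Int) := by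
      simp only [pvBuildState, hsplit, List.foldl_append, List.foldl_cons, List.foldl_nil]
    have hinner : ∀ (s : List Int × Int) (j : Int),
        ((PySem.List.pyRange (m : Int) (rightv + 1) 1).foldl
          (fun s (kk : Int) =>
            (s.1 ++ [PySem.List.pyGetD nums (m : Int) 0 - PySem.List.pyGetD nums j 0], kk)) s).2
          = rightv := by
      intro s j
      rw [pv_inner_fold, PySem.List.pyRange_one_succ_right hR]
      simp
    have hvals : (pvBuildStep nums (pvNextSmaller nums) (pvPrevSmaller nums) (nums.length : Int)
          (pvBuildState nums k (m : Int)) (m : Int)).1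
        = (pvBuildState nums k (m : Int)).1
          ++ (PySem.List.pyRange leftv ((m : Int) + 1) 1).flatMap
               (fun j => List.replicate (PySem.List.pyRange (m : Int) (rightv + 1) 1).length
                 (PySem.List.pyGetD nums (m : Int) 0 - PySem.List.pyGetD nums j 0)) := by
      simp only [pvBuildStep, ← hleftdef, ← hrightdef]
      rw [pv_build_vals nums (m : Int) rightv _ rfl]
    have hsnd : (pvBuildStep nums (pvNextSmaller nums) (pvPrevSmaller nums) (nums.length : Int)
          (pvBuildState nums k (m : Int)) (m : Int)).2 = rightv := by
      simp only [pvBuildStep, ← hleftdef, ← hrightdef]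
      refine pv_fold_snd _ rightv (fun s j => hinner s j) _ _ ?_
      exact List.ne_nil_of_mem (PySem.List.mem_pyRange_one.mpr ⟨hL, by omega⟩)
    have hmem0 : (0 : Int) ∈ (PySem.List.pyRange leftv ((m : Int) + 1) 1).flatMap
        (fun j => List.replicate (PySem.List.pyRange (m : Int) (rightv + 1) 1).length
          (PySem.List.pyGetD nums (m : Int) 0 - PySem.List.pyGetD nums j 0)) := by
      refine List.mem_flatMap.mpr ⟨(m : Int), PySem.List.mem_pyRange_one.mpr ⟨hL, by omega⟩, ?_⟩
      rw [sub_self]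
      refine List.mem_replicate.mpr ⟨?_, rfl⟩
      rw [PySem.List.length_pyRange_one]
      omega
    refine ⟨?_, ?_, ?_⟩
    · intro v hv
      rw [hstate, hvals] at hv
      rcases List.mem_append.mp hv with hv | hv
      · exact ile v hv
      · obtain ⟨j, hj, hvr⟩ := List.mem_flatMap.mp hv
        have hveq := List.eq_of_mem_replicate hvr
        obtain ⟨hj1, hj2⟩ := PySem.List.mem_pyRange_one.mp hj
        by_cases hjm : j = (m : Int)
        · rw [hveq, hjm, sub_self]
        · have hthr : (if (pvPrevSmaller nums).getD m 0 = -1 then 0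
              else (pvPrevSmaller nums).getD m 0 + 1) = leftv := by
            rw [hleftdef, hpg]
            by_cases h : (pvPrevSmaller nums).getD m 0 = -1
            · rw [if_pos h, if_neg (fun hc => hc h)]
            · rw [if_neg h, if_pos h]
          have hge := hpsspec.2 j (by rw [hthr]; exact hj1) (by omega)
          have : pvG nums j = PySem.List.pyGetD nums j 0 := rfl
          have : pvG nums ((m : Nat) : Int) = PySem.List.pyGetD nums (m : Int) 0 := rfl
          rw [hveq]
          have := hge
          simp only [pvG] at this
          omega
    · rw [hstate, hvals, List.count_append]
      have : 0 < ((PySem.List.pyRange leftv ((m : Int) + 1) 1).flatMap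
        (fun j => List.replicate (PySem.List.pyRange (m : Int) (rightv + 1) 1).length
          (PySem.List.pyGetD nums (m : Int) 0 - PySem.List.pyGetD nums j 0))).count 0 :=
        List.count_pos_iff.mpr hmem0
      omega
    · refine Or.inr ⟨Nat.succ_pos m, ?_⟩
      rw [hstate, hsnd, hrightdef, hng]
      simp

-- sum of the first m entries of a descending list of nonpositives with ≥ m zeros is 0
lemma pv_sum_take_zero :
    ∀ (ys : List Int) (m : Nat), ys.Pairwise (fun a b => b ≤ a) → (∀ y ∈ ys, y ≤ 0) →
      m ≤ ys.count 0 → (ys.take m).sum = 0 := by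
  intro ys
  induction ys with
  | nil => intro m _ _ _; simp
  | cons y t ih =>
    intro m hpw hle hc
    cases m with
    | zero => simp
    | succ m =>
      have hy : y = 0 := by
        by_contra hny
        have hcnt : (y :: t).count 0 = t.count 0 := by simp [hny]
        have h0 : (0:Int) ∈ t := List.count_pos_iff.mp (by omega)
        have h1 := List.rel_of_pairwise_cons hpw h0
        have h2 := hle y (by simp)
        omega
      subst hy
      have hcnt : ((0:Int) :: t).count 0 = t.count 0 + 1 := by simp
      simp only [List.take_succ_cons, List.sum_cons]
      rw [ih m hpw.of_cons (fun z hz => hle z (List.mem_cons_of_mem _ hz)) (by omega)]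
      ring

-- ===== VERDICT (by name: the statement is the Claim_ definition above) =====
theorem max_total_subarray_value_ii_spec : Claim_equal_max_total_subarray_value_ii := by
  intro nums k _
  unfold Spec_max_total_subarray_value_ii max_total_subarray_value_ii_alt
  have hdef : max_total_subarray_value_ii nums k
      = (PySem.List.slice
          (PySem.List.sorted (pvBuildState nums k (nums.length : Int)).1 (fun x => x) true)
          none (some (pvBuildState nums k (nums.length : Int)).2)).sum := rfl
  rw [hdef]
  rcases Nat.eq_zero_or_pos nums.length with hn | hn
  · have hnil : nums = [] := List.length_eq_zero_iff.mp hn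
    subst hnil
    rw [show pvBuildState ([] : List Int) k ((([] : List Int).length : Nat) : Int) = ([], k) by
      simp [pvBuildState, PySem.List.pyRange_one_eq_nil (le_refl 0)]]
    rw [show PySem.List.sorted ([] : List Int) (fun x => x) true = [] by rfl]
    have : PySem.List.slice ([] : List Int) none (some k) = [] := by
      refine List.eq_nil_iff_forall_not_mem.mpr ?_
      intro x hx
      exact List.not_mem_nil (PySem.List.mem_of_mem_slice _ none (some k) hx)
    rw [this, List.sum_nil]
  · obtain ⟨hall, hcnt, hsnd⟩ := pvBuild_inv nums k nums.length (le_refl _)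
    have hns : (pvNextSmaller nums).getD (nums.length - 1) 0 = -1 := by
      rcases (pvNextSmaller_spec nums).2 (nums.length - 1) (by omega) with h | h
      · exact h
      · exfalso
        have hcast : ((nums.length - 1 : Nat) : Int) = (nums.length : Int) - 1 := by
          push_cast [hn]
          ring
        rw [hcast] at h
        omega
    have hsnd2 : (pvBuildState nums k (nums.length : Int)).2 = (nums.length : Int) - 1 := by
      rcases hsnd with ⟨h0, _⟩ | ⟨_, h⟩
      · omega
      · rw [h, if_neg (fun hc => hc hns)]
    rw [hsnd2, show ((nums.length : Int) - 1) = ((nums.length - 1 : Nat) : Int) by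
      push_cast [hn]; ring]
    rw [PySem.List.slice_to_natCast]
    refine pv_sum_take_zero _ _ ?_ ?_ ?_
    · simpa using PySem.List.sorted_pairwise_rev (pvBuildState nums k (nums.length : Int)).1
        (fun x => x)
    · intro y hy
      exact hall y ((PySem.List.mem_sorted _ _ _ _).mp hy)
    · have hperm := PySem.List.sorted_perm (pvBuildState nums k (nums.length : Int)).1
        (fun x => x) true
      rw [hperm.count_eq]
      omega
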